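-- pv_equiv track=rewrite | github.com/Ploenypp/bioinformatics-uni-project | functions.py | indexTable
-- ===== SOURCE A (Python) =====
-- def indexTable(m, sequence):
--     """
--     Indexer les positions d'occurrences de tous les mots de taille k dans une sequence
--     entrée m : taille du mot à chercher dans le motif m <= k
--     entrée sequence : chaine de caractère représentant une sequence d'ADN
--     sortie indexes : dictionaire où les clés sont les mots et les valeurs les positions dans la sequence
--     """
--     indexes  = {}
--     for i in range(len(sequence)) :
--         if i + m > len(sequence) : break
--
--         aux = sequence[i:i+m]
--         if aux in indexes : indexes[aux].append(i)
--         else : indexes[aux] = [i]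
--
--     return indexes
-- ===== SOURCE B (Python) =====
-- def indexTable(m, sequence):
--     """Two-phase re-implementation: slice once into a list, then build the
--     table key by key over the distinct substrings (first-occurrence order)."""
--     n = len(sequence)
--     stop = min(n, n - m + 1)
--     subs = [sequence[i:i + m] for i in range(stop)]
--     return {w: [i for i, x in enumerate(subs) if x == w] for w in dict.fromkeys(subs)}
-- ===== Notes on version B (the rewrite author's own statement) =====
-- stated objective: alternative
-- what changed: A builds the dict in one pass, appending each index to the entry of its substring; B first materialises the list of all substrings with the same boundary rule, then builds the table key by key over the distinct substrings (dict.fromkeys order) with a per-key index scan.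
import Mathlib
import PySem

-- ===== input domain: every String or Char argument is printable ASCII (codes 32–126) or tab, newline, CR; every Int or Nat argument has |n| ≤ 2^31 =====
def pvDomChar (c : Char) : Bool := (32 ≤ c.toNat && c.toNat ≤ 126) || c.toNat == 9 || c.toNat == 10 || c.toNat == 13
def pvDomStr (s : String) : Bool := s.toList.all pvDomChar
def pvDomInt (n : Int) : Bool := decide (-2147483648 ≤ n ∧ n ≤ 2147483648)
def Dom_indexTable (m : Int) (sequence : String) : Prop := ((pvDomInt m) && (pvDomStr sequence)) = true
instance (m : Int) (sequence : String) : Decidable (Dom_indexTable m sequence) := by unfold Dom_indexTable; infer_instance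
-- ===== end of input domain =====

-- B replaces A's one-pass dict-append loop by a two-phase decomposition: slice all
-- substrings into a list once, then build each dict entry from the distinct keys
-- (first-occurrence order) by an index scan; same return value, 'alternative' objective.

-- ===== PORT A =====
-- the loop body of A: iterate i over the range, break when i + m > len(sequence)
def indexTableGo (m : Int) (s : List Char) (n : Int) :
    List Int → PySem.Dict String (List Int) → PySem.Dict String (List Int)
  | [], d => d
  | i :: rest, d =>
    if i + m > n then d
    else
      let aux : String := String.mk (PySem.List.slice s (some i) (some (i + m)))
      match d.get? aux with
      | some lst => indexTableGo m s n rest (d.insert aux (lst ++ [i]))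
      | none => indexTableGo m s n rest (d.insert aux [i])

def indexTable (m : Int) (sequence : String) : List (String × List Int) :=
  let s := sequence.toList
  let n : Int := (s.length : Int)
  (indexTableGo m s n (PySem.List.pyRange 0 n) PySem.Dict.empty).items

-- ===== PORT B =====
def indexTable_alt (m : Int) (sequence : String) : List (String × List Int) :=
  let s := sequence.toList
  let n : Int := (s.length : Int)
  let stop : Int := min n (n - m + 1)
  let subs : List String :=
    (PySem.List.pyRange 0 stop).map (fun i => String.mk (PySem.List.slice s (some i) (some (i + m))))
  (PySem.List.dedup subs).map (fun w =>
    (w, (PySem.List.enumerate subs).filterMap (fun p => if p.2 == w then some p.1 else none)))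

-- ===== PRECONDITION & SPEC =====
def Spec_indexTable (m : Int) (sequence : String) (out : List (String × List Int)) : Prop := out = indexTable_alt m sequence
instance (m : Int) (sequence : String) (out : List (String × List Int)) : Decidable (Spec_indexTable m sequence out) := by unfold Spec_indexTable; infer_instance

-- ===== CLAIM (what is proved, stated in full; the proofs are below) =====
def Claim_equal_indexTable : Prop := ∀ (m : Int) (sequence : String), Dom_indexTable m sequence → Spec_indexTable m sequence (indexTable m sequence)

-- ===== LEMMAS AND PROOFS =====

-- the substring key A and B both slice at position i
def pvKey (m : Int) (s : List Char) (i : Int) : String :=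
  String.mk (PySem.List.slice s (some i) (some (i + m)))

theorem pvRange_nil {a b : Int} (h : b ≤ a) : PySem.List.pyRange a b = [] := by
  simp [PySem.List.pyRange]
  omega

-- one step of A's dict update is Dict.modify
theorem pvStep_eq (d : PySem.Dict String (List Int)) (k : String) (i : Int) :
    (match d.get? k with
     | some lst => d.insert k (lst ++ [i])
     | none => d.insert k [i]) = d.modify k [] (· ++ [i]) := by
  cases h : d.get? k <;> simp [PySem.Dict.modify, PySem.Dict.getD, h]

-- A's loop with its break = a plain foldl over the truncated range
theorem pvGo_eq_foldl (m : Int) (s : List Char) (n : Int) :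
    ∀ (k : Nat) (a : Int), (n - a).toNat = k →
      ∀ (d : PySem.Dict String (List Int)),
        indexTableGo m s n (PySem.List.pyRange a n) d
          = (PySem.List.pyRange a (min n (n - m + 1))).foldl
              (fun d i => d.modify (pvKey m s i) [] (· ++ [i])) d := by
  intro k
  induction k with
  | zero =>
    intro a ha d
    have h1 : n ≤ a := by omega
    rw [pvRange_nil h1, pvRange_nil (by omega)]
    simp [indexTableGo]
  | succ k ih =>
    intro a ha d
    have h1 : a < n := by omega
    rw [PySem.List.pyRange_one_cons h1]
    by_cases hb : a + m > n
    · have h2 : min n (n - m + 1) ≤ a := by omega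
      rw [pvRange_nil h2]
      simp [indexTableGo, hb]
    · have h3 : a < min n (n - m + 1) := by omega
      rw [PySem.List.pyRange_one_cons h3]
      simp only [List.foldl_cons]
      rw [← pvStep_eq d (pvKey m s a) a]
      simp only [indexTableGo, if_neg hb, pvKey]
      cases hg : d.get? (String.mk (PySem.List.slice s (some a) (some (a + m)))) <;>
        exact ih (a + 1) (by omega) _

-- enumerate of a map over a range pairs each index with its value
theorem pvEnum_map (g : Int → String) :
    ∀ (k : Nat) (a b : Int), (b - a).toNat = k →
      PySem.List.enumerate ((PySem.List.pyRange a b).map g) a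
        = (PySem.List.pyRange a b).map (fun i => (i, g i)) := by
  intro k
  induction k with
  | zero =>
    intro a b h
    rw [pvRange_nil (by omega)]
    simp
  | succ k ih =>
    intro a b h
    have h1 : a < b := by omega
    rw [PySem.List.pyRange_one_cons h1]
    simp only [List.map_cons, PySem.List.enumerate_cons]
    rw [ih (a + 1) b (by omega)]

-- the per-key scan of B equals the filtered second components of the (key, index) pairs
theorem pvFilter_eq (g : Int → String) (w : String) :
    ∀ (xs : List Int),
      ((xs.map (fun i => (g i, i))).filter (fun p => p.1 == w)).map (·.2)
        = (xs.map (fun i => (i, g i))).filterMap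
            (fun p => if p.2 == w then some p.1 else none) := by
  intro xs
  induction xs with
  | nil => simp
  | cons x xs ih =>
    simp only [List.map_cons, List.filter_cons, List.filterMap_cons]
    by_cases hx : g x = w
    · simp [hx, ih]
    · simp [hx, ih]

-- the whole equality, stated over the character list
theorem pvMain (m : Int) (s : List Char) :
    (indexTableGo m s (s.length : Int) (PySem.List.pyRange 0 (s.length : Int)) PySem.Dict.empty).items
      = (PySem.List.dedup ((PySem.List.pyRange 0 (min (s.length : Int) ((s.length : Int) - m + 1))).map
            (fun i => String.mk (PySem.List.slice s (some i) (some (i + m)))))).map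
          (fun w => (w, (PySem.List.enumerate ((PySem.List.pyRange 0 (min (s.length : Int) ((s.length : Int) - m + 1))).map
            (fun i => String.mk (PySem.List.slice s (some i) (some (i + m)))))).filterMap
              (fun p => if p.2 == w then some p.1 else none))) := by
  set n : Int := (s.length : Int) with hn
  set stop : Int := min n (n - m + 1) with hstop
  set r := PySem.List.pyRange 0 stop with hr
  rw [pvGo_eq_foldl m s n (n - 0).toNat 0 rfl PySem.Dict.empty]
  rw [← hstop, ← hr]
  have hmap : (r.map (fun i => (pvKey m s i, i))).foldl
      (fun d p => d.modify p.1 [] (· ++ [p.2])) PySem.Dict.empty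
      = r.foldl (fun d i => d.modify (pvKey m s i) [] (· ++ [i])) PySem.Dict.empty :=
    by rw [List.foldl_map]
  rw [← hmap]
  set l := r.map (fun i => (pvKey m s i, i)) with hl
  set F := l.foldl (fun d p => d.modify p.1 [] (· ++ [p.2])) PySem.Dict.empty with hF
  have hsubs : r.map (fun i => String.mk (PySem.List.slice s (some i) (some (i + m))))
      = l.map (·.1) := by
    simp [hl, List.map_map, pvKey]
  rw [hsubs]
  have hnodup : F.keys.Nodup := by
    rw [hF]
    exact PySem.Dict.nodup_keys_foldl_modify_key l (fun p => p.1) []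
      (fun _ p v => v ++ [p.2]) PySem.Dict.empty (by simp)
  have hkeys : F.keys = PySem.List.dedup (l.map (·.1)) := by
    rw [hF]
    rw [PySem.Dict.keys_foldl_modify_key l (fun p => p.1) [] (fun _ p v => v ++ [p.2])]
    simp [PySem.Set.update_nil_left]
  rw [PySem.Dict.items_eq_map_keys F hnodup [], hkeys]
  apply List.map_congr_left
  intro w _
  have hval : F.getD w [] = (l.filter (fun p => p.1 == w)).map (·.2) := by
    rw [hF, PySem.Dict.getD_foldl_modify_append]
    simp
  have hsubs2 : l.map (·.1) = r.map (pvKey m s) := by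
    simp [hl, List.map_map]
  have henum : PySem.List.enumerate (r.map (pvKey m s)) 0
      = r.map (fun i => (i, pvKey m s i)) := by
    rw [hr]
    exact pvEnum_map (pvKey m s) (stop - 0).toNat 0 stop rfl
  rw [hval, hsubs2, henum, hl]
  exact congrArg (fun v => (w, v)) (pvFilter_eq (pvKey m s) w r)

-- ===== VERDICT (by name: the statement is the Claim_ definition above) =====
theorem indexTable_spec : Claim_equal_indexTable := by
  intro m sequence _
  unfold Spec_indexTable indexTable indexTable_alt
  exact pvMain m sequence.toList
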